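-- pv_equiv track=rewrite | github.com/RasikhAli/Superior-Academic-Tool | app.py | clean_teacher_name
-- ===== SOURCE A (Python) =====
-- def clean_teacher_name(teacher_name):
--     """Clean teacher name by removing common prefixes for image path generation"""
--     prefixes = [
--         "DR. ",
--         "DR ",
--         "MR. ",
--         "MR ",
--         "MS. ",
--         "MS ",
--         "MISS ",
--         "MISS. ",
--         "MRS. ",
--         "MRS ",
--         "PROF. ",
--         "PROF ",
--         "SIR ",
--         "MA'AM ",
--         "MAAM ",
--     ]
--     cleaned_name = teacher_name.upper()
--
--     for prefix in prefixes:
--         if cleaned_name.startswith(prefix.upper()):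
--             cleaned_name = cleaned_name[len(prefix) :].strip()
--             break
--
--     return cleaned_name
-- ===== SOURCE B (Python) =====
-- _PREFIX_WORDS = {"DR.", "DR", "MR.", "MR", "MS.", "MS", "MISS", "MISS.",
--                  "MRS.", "MRS", "PROF.", "PROF", "SIR", "MA'AM", "MAAM"}
--
--
-- def clean_teacher_name(teacher_name):
--     """Clean teacher name by removing common prefixes for image path generation"""
--     upper = teacher_name.upper()
--     first, sep, rest = upper.partition(' ')
--     if sep and first in _PREFIX_WORDS:
--         return rest.strip()
--     return upper
-- ===== Notes on version B (the rewrite author's own statement) =====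
-- stated objective: simpler
-- what changed: Replaces the 15-prefix startswith scan by one partition at the first space and a single set lookup of the first token (prefix words without their trailing space).
import Mathlib
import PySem

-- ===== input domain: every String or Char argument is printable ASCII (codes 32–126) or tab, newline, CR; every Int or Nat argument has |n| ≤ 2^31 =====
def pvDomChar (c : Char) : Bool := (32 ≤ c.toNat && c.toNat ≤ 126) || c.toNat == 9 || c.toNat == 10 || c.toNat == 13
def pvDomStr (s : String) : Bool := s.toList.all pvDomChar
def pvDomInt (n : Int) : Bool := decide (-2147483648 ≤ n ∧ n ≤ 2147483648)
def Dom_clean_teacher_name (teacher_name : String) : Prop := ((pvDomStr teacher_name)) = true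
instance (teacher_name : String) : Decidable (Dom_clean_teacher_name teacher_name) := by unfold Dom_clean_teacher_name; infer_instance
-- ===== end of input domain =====

-- B replaces A's scan over 15 "PREFIX "-startswith tests by one partition at the first
-- space and a single set lookup of the first token (objective: simpler).

-- ===== PORT A =====
-- A's prefix list, verbatim (each with its trailing space)
def pvPrefixesA : List (List Char) :=
  ["DR. ".toList, "DR ".toList, "MR. ".toList, "MR ".toList, "MS. ".toList,
   "MS ".toList, "MISS ".toList, "MISS. ".toList, "MRS. ".toList, "MRS ".toList,
   "PROF. ".toList, "PROF ".toList, "SIR ".toList, "MA'AM ".toList, "MAAM ".toList]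

-- the 'for prefix in prefixes: if startswith: …; break' loop
-- (cleaned_name[len(prefix):] on a nonnegative in-range start is List.drop — exact)
def pvLoopA : List (List Char) → List Char → List Char
  | [], cleaned => cleaned
  | p :: ps, cleaned =>
      if PySem.Chars.startswith cleaned p then PySem.Chars.strip (cleaned.drop p.length)
      else pvLoopA ps cleaned

def clean_teacher_name (teacher_name : String) : String :=
  String.ofList (pvLoopA pvPrefixesA (PySem.Chars.upper teacher_name.toList))

-- ===== PORT B =====
-- the Python set literal _PREFIX_WORDS (distinct elements, so the Set is the list itself)
def pvPrefixWords : List (List Char) :=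
  ["DR.".toList, "DR".toList, "MR.".toList, "MR".toList, "MS.".toList,
   "MS".toList, "MISS".toList, "MISS.".toList, "MRS.".toList, "MRS".toList,
   "PROF.".toList, "PROF".toList, "SIR".toList, "MA'AM".toList, "MAAM".toList]

-- upper.partition(' ') ported by hand (PySem has no partition): first = the chars before the
-- first space = takeWhile (≠ ' '); sep-and-rest = dropWhile (≠ ' ') (sep nonempty iff this is);
-- rest = its tail — exact for a single-character separator.
def clean_teacher_name_alt (teacher_name : String) : String :=
  let upper := PySem.Chars.upper teacher_name.toList
  let first := upper.takeWhile (fun c => c != ' ')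
  let sepRest := upper.dropWhile (fun c => c != ' ')
  if sepRest != [] && pvPrefixWords.contains first then
    String.ofList (PySem.Chars.strip (sepRest.drop 1))
  else
    String.ofList upper

-- ===== PRECONDITION & SPEC =====
def Spec_clean_teacher_name (teacher_name : String) (out : String) : Prop := out = clean_teacher_name_alt teacher_name
instance (teacher_name : String) (out : String) : Decidable (Spec_clean_teacher_name teacher_name out) := by unfold Spec_clean_teacher_name; infer_instance

-- ===== CLAIM (what is proved, stated in full; the proofs are below) =====
def Claim_equal_clean_teacher_name : Prop := ∀ (teacher_name : String), Dom_clean_teacher_name teacher_name → Spec_clean_teacher_name teacher_name (clean_teacher_name teacher_name)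

-- ===== LEMMAS AND PROOFS =====

-- a prefix "tok ++ ' '" (tok space-free) matches "t ++ ' ' :: r" (t space-free) iff tok = t
theorem pv_sw_iff (tok : List Char) : ∀ (t r : List Char), ' ' ∉ t → ' ' ∉ tok →
    (PySem.Chars.startswith (t ++ ' ' :: r) (tok ++ [' ']) = true ↔ tok = t) := by
  induction tok with
  | nil =>
      intro t r ht _
      rw [PySem.Chars.startswith_iff]
      cases t with
      | nil => simp
      | cons c t' =>
          simp only [List.nil_append, List.cons_append, List.cons_prefix_cons]
          constructor
          · rintro ⟨h, -⟩; exact absurd (h ▸ List.mem_cons_self) ht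
          · intro h; simp at h
  | cons c tok' ih =>
      intro t r ht htok
      cases t with
      | nil =>
          rw [PySem.Chars.startswith_iff]
          simp only [List.cons_append, List.nil_append, List.cons_prefix_cons]
          constructor
          · rintro ⟨h, -⟩; exact absurd (h ▸ List.mem_cons_self) htok
          · intro h; simp at h
      | cons d t' =>
          rw [PySem.Chars.startswith_iff]
          simp only [List.cons_append, List.cons_prefix_cons]
          rw [← PySem.Chars.startswith_iff,
              ih t' r (fun h => ht (List.mem_cons_of_mem _ h))
                      (fun h => htok (List.mem_cons_of_mem _ h))]
          constructor
          · rintro ⟨h1, h2⟩; rw [h1, h2]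
          · intro h; injection h with h1 h2; exact ⟨h1, h2⟩

-- no prefix ending in a space matches a space-free string
theorem pv_sw_nospace (u tok : List Char) (hu : ' ' ∉ u) :
    PySem.Chars.startswith u (tok ++ [' ']) = false := by
  by_contra h
  have h' : PySem.Chars.startswith u (tok ++ [' ']) = true := by
    cases hb : PySem.Chars.startswith u (tok ++ [' ']) with
    | false => exact absurd hb h
    | true => rfl
  rw [PySem.Chars.startswith_iff] at h'
  exact hu (h'.subset (by simp))

-- A's loop on a space-free string returns it unchanged
theorem pv_loopA_nospace (toks : List (List Char)) (u : List Char) (hu : ' ' ∉ u) :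
    pvLoopA (toks.map (fun tok => tok ++ [' '])) u = u := by
  induction toks with
  | nil => rfl
  | cons tok toks ih =>
      simp only [List.map_cons, pvLoopA, pv_sw_nospace u tok hu, Bool.false_eq_true,
        if_false, ih]

-- A's loop on "t ++ ' ' :: r" is a membership test of the first token t
theorem pv_loopA_split (toks : List (List Char)) (t r : List Char) (ht : ' ' ∉ t)
    (htoks : ∀ tok ∈ toks, ' ' ∉ tok) :
    pvLoopA (toks.map (fun tok => tok ++ [' '])) (t ++ ' ' :: r)
      = if toks.contains t then PySem.Chars.strip r else t ++ ' ' :: r := by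
  induction toks with
  | nil => rfl
  | cons tok toks ih =>
      simp only [List.map_cons, pvLoopA]
      by_cases hq : tok = t
      · subst hq
        rw [if_pos ((pv_sw_iff tok tok r ht (htoks tok List.mem_cons_self)).mpr rfl)]
        have hdrop : (tok ++ ' ' :: r).drop (tok ++ [' ']).length = r := by
          rw [show tok ++ ' ' :: r = (tok ++ [' ']) ++ r by simp, List.drop_left]
        rw [hdrop, List.contains_cons]
        simp
      · have hsw : PySem.Chars.startswith (t ++ ' ' :: r) (tok ++ [' ']) = false := by
          cases hb : PySem.Chars.startswith (t ++ ' ' :: r) (tok ++ [' ']) with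
          | false => rfl
          | true => exact absurd ((pv_sw_iff tok t r ht (htoks tok List.mem_cons_self)).mp hb) hq
        rw [hsw]
        simp only [Bool.false_eq_true, if_false]
        rw [ih (fun x hx => htoks x (List.mem_cons_of_mem _ hx))]
        simp [Ne.symm hq]

-- the two token lists line up: A's prefixes are B's words with a trailing space
theorem pv_prefixes_eq : pvPrefixesA = pvPrefixWords.map (fun tok => tok ++ [' ']) := by decide

theorem pv_words_nospace : ∀ tok ∈ pvPrefixWords, ' ' ∉ tok := by decide

-- the head of dropWhile p, when it exists, fails p
theorem pv_dropWhile_cons (p : Char → Bool) (l r : List Char) (c : Char)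
    (h : l.dropWhile p = c :: r) : p c = false := by
  induction l with
  | nil => simp at h
  | cons a l ih =>
      rw [List.dropWhile_cons] at h
      by_cases hp : p a
      · exact ih (by simpa [hp] using h)
      · simp [hp] at h; rw [← h.1]; simpa using hp

theorem clean_eq (u : List Char) :
    pvLoopA pvPrefixesA u
      = if (u.dropWhile (fun c => c != ' ') != []
              && pvPrefixWords.contains (u.takeWhile (fun c => c != ' '))) = true then
          PySem.Chars.strip ((u.dropWhile (fun c => c != ' ')).drop 1)
        else u := by
  rw [pv_prefixes_eq]
  by_cases hsp : ' ' ∈ u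
  · -- decompose u at its first space
    obtain ⟨r, hdw⟩ : ∃ r, u.dropWhile (fun c => c != ' ') = ' ' :: r := by
      have hne : u.dropWhile (fun c => c != ' ') ≠ [] := by
        intro h
        have := List.dropWhile_eq_nil_iff.mp h ' ' hsp
        simp at this
      cases hd : u.dropWhile (fun c => c != ' ') with
      | nil => exact absurd hd hne
      | cons c r =>
          have hc := pv_dropWhile_cons _ _ _ _ hd
          have : c = ' ' := by simpa using hc
          exact ⟨r, by rw [this]⟩
    have ht : ' ' ∉ u.takeWhile (fun c => c != ' ') := by
      intro h
      have := List.mem_takeWhile_imp h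
      simp at this
    have hu : u = u.takeWhile (fun c => c != ' ') ++ ' ' :: r := by
      conv_lhs => rw [← List.takeWhile_append_dropWhile (p := fun c => c != ' ') (l := u)]
      rw [hdw]
    rw [hdw]
    conv_lhs => rw [hu]
    rw [pv_loopA_split _ _ _ ht pv_words_nospace]
    cases hm : pvPrefixWords.contains (u.takeWhile (fun c => c != ' ')) with
    | true => simp
    | false => rw [← hu]; simp
  · have hdw : u.dropWhile (fun c => c != ' ') = [] := by
      rw [List.dropWhile_eq_nil_iff]
      intro x hx
      simp only [bne_iff_ne, ne_eq]
      intro h; exact hsp (h ▸ hx)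
    rw [pv_loopA_nospace _ _ hsp, hdw]
    simp

-- ===== VERDICT (by name: the statement is the Claim_ definition above) =====
theorem clean_teacher_name_spec : Claim_equal_clean_teacher_name := by
  intro s _
  show clean_teacher_name s = clean_teacher_name_alt s
  unfold clean_teacher_name clean_teacher_name_alt
  rw [clean_eq, apply_ite String.ofList]
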